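-- pv_equiv track=rewrite | github.com/Sami482005/Sami_Saliby_BioinformHER | src/MSAanalysis.py | get_conserved_ranges
-- ===== SOURCE A (Python) =====
-- def get_conserved_ranges(conserved_positions, min_length=10):
--     if not conserved_positions:
--         return []
--
--     ranges = []
--     start = prev = conserved_positions[0]
--
--     for pos in conserved_positions[1:]:
--         if pos == prev + 1:
--             prev = pos
--         else:
--             if (prev - start + 1) >= min_length:
--                 ranges.append((start, prev))
--             start = prev = pos
--     # Add the final region if it meets length requirement
--     if (prev - start + 1) >= min_length:
--         ranges.append((start, prev))
--
--     return ranges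
-- ===== SOURCE B (Python) =====
-- def get_conserved_ranges(conserved_positions, min_length=10):
--     # Boundary detection: a position index i starts a run iff it is index 0 or
--     # breaks the +1 chain with its left neighbour; it ends a run iff it is the
--     # last index or the +1 chain breaks to its right neighbour.  Zipping the
--     # k-th start with the k-th end gives the k-th maximal run.
--     n = len(conserved_positions)
--     starts = [i for i in range(n)
--               if i == 0 or conserved_positions[i] != conserved_positions[i - 1] + 1]
--     ends = [i for i in range(n)
--             if i == n - 1 or conserved_positions[i + 1] != conserved_positions[i] + 1]
--     return [(conserved_positions[s], conserved_positions[e])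
--             for s, e in zip(starts, ends)
--             if conserved_positions[e] - conserved_positions[s] + 1 >= min_length]
-- ===== Notes on version B (the rewrite author's own statement) =====
-- stated objective: alternative
-- what changed: A threads mutable (ranges,start,prev) state through one loop with the length test duplicated after it; B instead detects run boundaries by comparing adjacent elements (run-start indices and run-end indices as two index comprehensions), zips the k-th start with the k-th end, and filters/projects the pairs.
import Mathlib
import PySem

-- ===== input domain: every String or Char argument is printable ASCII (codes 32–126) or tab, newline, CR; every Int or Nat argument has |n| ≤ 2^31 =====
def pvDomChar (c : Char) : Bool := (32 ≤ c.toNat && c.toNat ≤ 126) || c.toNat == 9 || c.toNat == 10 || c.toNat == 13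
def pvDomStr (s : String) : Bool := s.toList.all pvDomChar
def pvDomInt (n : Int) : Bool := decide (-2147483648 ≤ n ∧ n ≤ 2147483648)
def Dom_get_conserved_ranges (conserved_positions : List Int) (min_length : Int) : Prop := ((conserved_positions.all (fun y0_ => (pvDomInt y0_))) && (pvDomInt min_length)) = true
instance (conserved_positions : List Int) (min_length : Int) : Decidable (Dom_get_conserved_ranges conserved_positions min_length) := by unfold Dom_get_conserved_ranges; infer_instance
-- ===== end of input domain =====

-- B replaces A's stateful (ranges,start,prev) loop by index-based boundary detection:
-- collect run-start indices and run-end indices by comparing adjacent elements, zip them,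
-- and filter/project the pairs (objective: idiomatic staged decomposition, same O(n) cost).

-- ===== PORT A =====
-- the for-loop of A as structural recursion over the same (ranges, start, prev) state;
-- the base case is A's code after the loop (the final-region test)
def pvGoA (ml : Int) (ranges : List (Int × Int)) (start prev : Int) : List Int → List (Int × Int)
  | [] => if prev - start + 1 ≥ ml then ranges ++ [(start, prev)] else ranges
  | pos :: rest =>
    if pos = prev + 1 then pvGoA ml ranges start pos rest
    else pvGoA ml (if prev - start + 1 ≥ ml then ranges ++ [(start, prev)] else ranges) pos pos rest

def get_conserved_ranges (conserved_positions : List Int) (min_length : Int) : List (Int × Int) :=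
  match conserved_positions with
  | [] => []
  | x :: rest => pvGoA min_length [] x x rest

-- ===== PORT B =====
-- B's first comprehension: indices i with i == 0 or xs[i] != xs[i-1] + 1.
-- All indexing in Source B is at in-range nonnegative indices (i-1 is only read when i ≥ 1,
-- i+1 only when i < n-1, thanks to `or` short-circuit), so List.getD over Nat indices is exact.
def pvStarts (xs : List Int) : List Nat :=
  (List.range xs.length).filter (fun i => i == 0 || !(xs.getD i 0 == xs.getD (i - 1) 0 + 1))

-- B's second comprehension: indices i with i == n-1 or xs[i+1] != xs[i] + 1
def pvEnds (xs : List Int) : List Nat :=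
  (List.range xs.length).filter (fun i => i == xs.length - 1 || !(xs.getD (i + 1) 0 == xs.getD i 0 + 1))

-- B's final comprehension over zip(starts, ends)
def get_conserved_ranges_alt (conserved_positions : List Int) (min_length : Int) : List (Int × Int) :=
  (((pvStarts conserved_positions).zip (pvEnds conserved_positions)).filter
      (fun se => conserved_positions.getD se.2 0 - conserved_positions.getD se.1 0 + 1 ≥ min_length)).map
    (fun se => (conserved_positions.getD se.1 0, conserved_positions.getD se.2 0))

-- ===== PRECONDITION & SPEC =====
def Spec_get_conserved_ranges (conserved_positions : List Int) (min_length : Int) (out : List (Int × Int)) : Prop := out = get_conserved_ranges_alt conserved_positions min_length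
instance (conserved_positions : List Int) (min_length : Int) (out : List (Int × Int)) : Decidable (Spec_get_conserved_ranges conserved_positions min_length out) := by unfold Spec_get_conserved_ranges; infer_instance

-- ===== CLAIM (what is proved, stated in full; the proofs are below) =====
def Claim_equal_get_conserved_ranges : Prop := ∀ (conserved_positions : List Int) (min_length : Int), Dom_get_conserved_ranges conserved_positions min_length → Spec_get_conserved_ranges conserved_positions min_length (get_conserved_ranges conserved_positions min_length)

-- ===== LEMMAS AND PROOFS =====

-- the maximal consecutive runs of x :: rest, as (first, last) value pairs
def pvRuns (s p : Int) : List Int → List (Int × Int)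
  | [] => [(s, p)]
  | y :: r => if y = p + 1 then pvRuns s y r else (s, p) :: pvRuns y y r

-- index pairs projected to value pairs
def pvProj (xs : List Int) (l : List (Nat × Nat)) : List (Int × Int) :=
  l.map (fun se => (xs.getD se.1 0, xs.getD se.2 0))

-- the "interior break" indices of y :: r: i < r.length with r[i] ≠ (y::r)[i] + 1
def pvT (y : Int) (r : List Int) : List Nat :=
  (List.range r.length).filter (fun i => !(r.getD i 0 == (y :: r).getD i 0 + 1))

-- changing the pending start only changes the first pair's first component
theorem pvRuns_start (t : List Int) : ∀ p s,
    pvRuns s p t = (s, ((pvRuns p p t).headD (0, 0)).2) :: (pvRuns p p t).tail := by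
  induction t with
  | nil => intro p s; simp [pvRuns]
  | cons u v ih =>
    intro p s
    by_cases h : u = p + 1
    · simp only [pvRuns, if_pos h]
      rw [ih u s, ih u p]
      simp
    · simp [pvRuns, h]

-- A's loop = runs filtered by length, appended to the accumulator
theorem pvGoA_eq (ml : Int) (rest : List Int) : ∀ (acc : List (Int × Int)) (s p : Int),
    pvGoA ml acc s p rest = acc ++ (pvRuns s p rest).filter (fun q => ml ≤ q.2 - q.1 + 1) := by
  induction rest with
  | nil =>
    intro acc s p
    by_cases h : p - s + 1 ≥ ml <;> simp [pvGoA, pvRuns, h]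
  | cons y r ih =>
    intro acc s p
    by_cases h : y = p + 1
    · simp [pvGoA, pvRuns, h, ih]  -- continue case
    · simp only [pvGoA, if_neg h, pvRuns, ih]
      by_cases h2 : p - s + 1 ≥ ml
      · rw [if_pos h2, List.filter_cons_of_pos (by simp; omega)]
        simp
      · rw [if_neg h2, List.filter_cons_of_neg (by simp; omega)]

-- filtering a mapped list = mapping the list filtered by the predicate read through the map
theorem pvFilterMap {α β : Type} (p : β → Bool) (q : α → Bool) (f : α → β) (l : List α)
    (h : ∀ a, p (f a) = q a) : (l.map f).filter p = (l.filter q).map f := by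
  induction l with
  | nil => rfl
  | cons a l ih =>
    by_cases hp : q a <;> simp [h, hp, ih]

-- starts of a nonempty list: 0, then the interior breaks shifted by one
theorem pvStarts_eq (y : Int) (r : List Int) :
    pvStarts (y :: r) = 0 :: (pvT y r).map (· + 1) := by
  unfold pvStarts pvT
  rw [show (y :: r).length = r.length + 1 from rfl, List.range_succ_eq_map,
    List.filter_cons_of_pos (by simp), List.filter_map]
  have hfc : List.filter ((fun i => i == 0 || !((y :: r).getD i 0 == (y :: r).getD (i - 1) 0 + 1)) ∘ Nat.succ) (List.range r.length)
      = List.filter (fun i => !(r.getD i 0 == (y :: r).getD i 0 + 1)) (List.range r.length) := by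
    apply List.filter_congr; intro i _; simp [Function.comp]
  rw [hfc]

-- interior breaks, one step: a possible break at index 0, then the rest shifted
theorem pvT_cons (x y : Int) (r : List Int) :
    pvT x (y :: r) = (if y = x + 1 then [] else [0]) ++ (pvT y r).map (· + 1) := by
  unfold pvT
  rw [show (y :: r).length = r.length + 1 from rfl, List.range_succ_eq_map,
    List.filter_cons, List.filter_map]
  have hfc : List.filter ((fun i => !((y :: r).getD i 0 == (x :: y :: r).getD i 0 + 1)) ∘ Nat.succ) (List.range r.length)
      = List.filter (fun i => !(r.getD i 0 == (y :: r).getD i 0 + 1)) (List.range r.length) := by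
    apply List.filter_congr; intro i _; simp [Function.comp]
  rw [hfc]
  by_cases h : y = x + 1 <;> simp [h]

-- ends, one step: a possible end at index 0, then the rest shifted
theorem pvEnds_cons (x y : Int) (r : List Int) :
    pvEnds (x :: y :: r) = (if y = x + 1 then [] else [0]) ++ (pvEnds (y :: r)).map (· + 1) := by
  unfold pvEnds
  rw [show (x :: y :: r).length = (r.length + 1) + 1 from rfl, List.range_succ_eq_map,
    List.filter_cons, List.filter_map]
  have hfc : List.filter ((fun i => i == r.length + 1 + 1 - 1 || !((x :: y :: r).getD (i + 1) 0 == (x :: y :: r).getD i 0 + 1)) ∘ Nat.succ) (List.range (r.length + 1))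
      = List.filter (fun i => i == (y :: r).length - 1 || !((y :: r).getD (i + 1) 0 == (y :: r).getD i 0 + 1)) (List.range (r.length + 1)) := by
    apply List.filter_congr; intro i _; simp [Function.comp]
  rw [hfc]
  by_cases h : y = x + 1 <;> simp [h]

theorem pvEnds_ne_nil (r : List Int) : ∀ y, pvEnds (y :: r) ≠ [] := by
  induction r with
  | nil => intro y; simp [pvEnds]
  | cons z t ih =>
    intro y
    rw [pvEnds_cons]
    by_cases h : z = y + 1 <;> simp [h, ih]

-- pvProj unfolded one step
theorem pvProj_cons (xs : List Int) (a : Nat × Nat) (l : List (Nat × Nat)) :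
    pvProj xs (a :: l) = (xs.getD a.1 0, xs.getD a.2 0) :: pvProj xs l := rfl

-- shifting every index by one and reading through x :: ys = reading through ys
theorem pvProj_cons_shift (x : Int) (ys : List Int) (S E : List Nat) :
    pvProj (x :: ys) ((S.map (· + 1)).zip (E.map (· + 1))) = pvProj ys (S.zip E) := by
  unfold pvProj
  rw [List.zip_map, List.map_map]
  apply List.map_congr_left
  intro a _
  simp [Prod.map]

-- main correspondence: zipped boundary indices, projected to values, are the runs
theorem pvZipRuns (r : List Int) : ∀ y,
    pvProj (y :: r) ((pvStarts (y :: r)).zip (pvEnds (y :: r))) = pvRuns y y r := by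
  induction r with
  | nil => intro y; simp [pvStarts, pvEnds, pvProj, pvRuns]
  | cons z t ih =>
    intro y
    rw [pvStarts_eq, pvT_cons, pvEnds_cons]
    by_cases h : z = y + 1
    · -- run continues: no interior break at index 1, no end at index 0
      simp only [if_pos h, List.nil_append]
      obtain ⟨e0, E1, hE⟩ : ∃ e0 E1, pvEnds (z :: t) = e0 :: E1 := by
        cases hne : pvEnds (z :: t) with
        | nil => exact absurd hne (pvEnds_ne_nil t z)
        | cons a b => exact ⟨a, b, rfl⟩
      have ihy := ih z
      rw [pvStarts_eq, hE, List.zip_cons_cons, pvProj_cons] at ihy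
      rw [hE, List.map_cons, List.zip_cons_cons, pvProj_cons, pvProj_cons_shift]
      rw [show pvRuns y y (z :: t) = pvRuns y z t from by simp [pvRuns, h],
        pvRuns_start t z y, ← ihy]
      simp
    · -- run breaks at z: a fresh start index 1 and a fresh end index 0 appear
      simp only [if_neg h, List.cons_append, List.nil_append, List.map_cons]
      rw [List.zip_cons_cons, pvProj_cons]
      rw [show ((1 : Nat) :: ((pvT z t).map (· + 1)).map (· + 1))
            = ((0 :: (pvT z t).map (· + 1)).map (· + 1)) from rfl]
      rw [pvProj_cons_shift, ← pvStarts_eq, ih z]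
      rw [show pvRuns y y (z :: t) = (y, y) :: pvRuns z z t from by simp [pvRuns, h]]
      simp

-- ===== VERDICT (by name: the statement is the Claim_ definition above) =====
theorem get_conserved_ranges_spec : Claim_equal_get_conserved_ranges := by
  intro cps ml _
  unfold Spec_get_conserved_ranges
  cases cps with
  | nil => simp [get_conserved_ranges, get_conserved_ranges_alt, pvStarts, pvEnds]
  | cons x rest =>
    rw [show get_conserved_ranges (x :: rest) ml = pvGoA ml [] x x rest from rfl]
    unfold get_conserved_ranges_alt
    rw [pvGoA_eq, List.nil_append, ← pvZipRuns rest x]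
    unfold pvProj
    apply pvFilterMap
    intro a
    simp [ge_iff_le]
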